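-- pv_equiv track=rewrite | github.com/leehomcs/LeetCode | 486_predict_the_winner.py | predict_winner
-- ===== SOURCE A (Python) =====
-- def predict_winner(array):
--   # dynamic programming: O(n^2), O(n^2)
--   #dp[i][j] represents the maximum points we can get from array[i:j]
--   # a = array[i] + min(dp[i+2][j], dp[i+1][j-1])
--   # b = array[j] + min(dp[i+1][j-1], dp[i][j-2])
--   # dp[i][j] = max(a, b)
--   def calculate_points(array):
--     length = len(array)
--     dp = [[0] * length for _ in range(length)]
--     for gap in range(length):
--       for j in range(gap, length):
--         i = j-gap
--         x = 0
--         if (i+2) <= j: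
--           x = dp[i+2][j]
--         y = 0
--         if (i+1) <= (j-1):
--           y = dp[i+1][j-1]
--         z = 0
--         if i <= j-2:
--           z = dp[i][j-2]
--         dp[i][j] = max(array[i]+ min(x,y), array[j]+min(y,z))
--     return dp[0][length-1]
--   return calculate_points(array)
-- ===== SOURCE B (Python) =====
-- def predict_winner(array):
--     # prefix-sum interval DP: dp[i][j] = best score for the player to move on array[i..j],
--     # single-step recurrence (take one end, opponent plays optimally on the rest)
--     n = len(array)
--     pre = [0]
--     for v in array:
--         pre.append(pre[-1] + v)
--     dp = [[0] * n for _ in range(n)]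
--     for i in range(n):
--         dp[i][i] = array[i]
--     for gap in range(1, n):
--         for i in range(n - gap):
--             j = i + gap
--             take_left = array[i] + (pre[j + 1] - pre[i + 1]) - dp[i + 1][j]
--             take_right = array[j] + (pre[j] - pre[i]) - dp[i][j - 1]
--             dp[i][j] = max(take_left, take_right)
--     return dp[0][n - 1]
-- ===== Notes on version B (the rewrite author's own statement) =====
-- stated objective: alternative
-- what changed: Replaces A's two-step recurrence dp[i][j]=max(a[i]+min(dp[i+2][j],dp[i+1][j-1]), a[j]+min(dp[i+1][j-1],dp[i][j-2])) by a prefix-sum table plus the single-step recurrence dp[i][j]=max(a[i]+(sum(i+1,j)-dp[i+1][j]), a[j]+(sum(i,j-1)-dp[i][j-1])) (take one end, opponent plays optimally on the rest).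
import Mathlib
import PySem

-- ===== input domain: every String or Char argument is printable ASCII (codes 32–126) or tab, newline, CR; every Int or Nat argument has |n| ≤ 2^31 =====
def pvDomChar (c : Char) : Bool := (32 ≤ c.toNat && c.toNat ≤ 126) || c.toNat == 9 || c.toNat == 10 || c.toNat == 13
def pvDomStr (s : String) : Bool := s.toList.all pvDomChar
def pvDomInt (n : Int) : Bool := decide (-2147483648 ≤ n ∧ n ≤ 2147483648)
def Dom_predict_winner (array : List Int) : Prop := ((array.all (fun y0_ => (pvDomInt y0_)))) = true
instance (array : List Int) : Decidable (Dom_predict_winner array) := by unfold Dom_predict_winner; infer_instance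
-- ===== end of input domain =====

-- B changes the DP recurrence (prefix sums + single-step take-an-end) while A uses the
-- two-step min/max recurrence; same O(n^2) cost, genuinely different decomposition.

-- ===== PORT A =====
-- dp[i][j] read / write on the 2-D Python table (every index A performs is in range)
def pvGet (dp : List (List Int)) (i j : Nat) : Int := (dp.getD i []).getD j 0
def pvSet (dp : List (List Int)) (i j : Nat) (v : Int) : List (List Int) :=
  dp.set i ((dp.getD i []).set j v)

-- A's inner-loop body.  The three Python guards (i+2)<=j, (i+1)<=(j-1), i<=j-2 are over
-- ints all equivalent to i+2 ≤ j, written so here (indices here are the same naturals).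
def pvStepA (array : List Int) (gap : Nat) (dp : List (List Int)) (j : Nat) : List (List Int) :=
  let i := j - gap
  let x := if i + 2 ≤ j then pvGet dp (i+2) j else 0
  let y := if i + 2 ≤ j then pvGet dp (i+1) (j-1) else 0
  let z := if i + 2 ≤ j then pvGet dp i (j-2) else 0
  pvSet dp i j (max (array.getD i 0 + min x y) (array.getD j 0 + min y z))

def pvTblA (array : List Int) : List (List Int) :=
  (List.range array.length).foldl
    (fun dp gap => (List.range' gap (array.length - gap)).foldl (pvStepA array gap) dp)
    ((List.range array.length).map (fun _ => List.replicate array.length 0))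

def predict_winner (array : List Int) : Int := pvGet (pvTblA array) 0 (array.length - 1)

-- ===== PORT B =====
-- prefix-sum list: pre[k] = sum of the first k elements
def pvPreB (array : List Int) : List Int :=
  array.foldl (fun pre v => pre ++ [pre.getLastD 0 + v]) [0]

-- B's inner-loop body: take one end, subtract the opponent's optimum on the rest
def pvStepB (array pre : List Int) (gap : Nat) (dp : List (List Int)) (i : Nat) : List (List Int) :=
  let j := i + gap
  let tl := array.getD i 0 + (pre.getD (j+1) 0 - pre.getD (i+1) 0) - pvGet dp (i+1) j
  let tr := array.getD j 0 + (pre.getD j 0 - pre.getD i 0) - pvGet dp i (j-1)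
  pvSet dp i j (max tl tr)

def pvTblB (array : List Int) : List (List Int) :=
  (List.range' 1 (array.length - 1)).foldl
    (fun dp gap => (List.range (array.length - gap)).foldl
        (pvStepB array (pvPreB array) gap) dp)
    ((List.range array.length).foldl
      (fun dp i => pvSet dp i i (array.getD i 0))
      ((List.range array.length).map (fun _ => List.replicate array.length 0)))

def predict_winner_alt (array : List Int) : Int := pvGet (pvTblB array) 0 (array.length - 1)

-- ===== PRECONDITION & SPEC =====
-- Pre_ excludes only the empty list, on which A raises IndexError (dp[0][-1] on an empty dp).
def Pre_predict_winner (array : List Int) : Prop := array ≠ []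
instance (array : List Int) : Decidable (Pre_predict_winner array) := by unfold Pre_predict_winner; infer_instance
def pvWitness_predict_winner : List Int := ([1, 5, 2])

def Spec_predict_winner (array : List Int) (out : Int) : Prop := out = predict_winner_alt array
instance (array : List Int) (out : Int) : Decidable (Spec_predict_winner array out) := by unfold Spec_predict_winner; infer_instance

-- ===== CLAIM (what is proved, stated in full; the proofs are below) =====
def Claim_equal_predict_winner : Prop := ∀ (array : List Int), Dom_predict_winner array → Pre_predict_winner array → Spec_predict_winner array (predict_winner array)

-- ===== LEMMAS AND PROOFS =====

-- a i, shorthand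
def pvA (array : List Int) (i : Nat) : Int := array.getD i 0

-- interval sum a i + … + a j, expressed through prefix sums
def pvS (array : List Int) (i j : Nat) : Int := (array.take (j+1)).sum - (array.take i).sum

-- A's recurrence as a mathematical function on intervals (0 outside i ≤ j)
def pvF (array : List Int) (i j : Nat) : Int :=
  if j < i then 0
  else
    let x := if _h : i + 2 ≤ j then pvF array (i+2) j else 0
    let y := if _h : i + 2 ≤ j then pvF array (i+1) (j-1) else 0
    let z := if _h : i + 2 ≤ j then pvF array i (j-2) else 0
    max (pvA array i + min x y) (pvA array j + min y z)
  termination_by (j + 1 - i)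
  decreasing_by all_goals omega

-- B's recurrence as a mathematical function on intervals
def pvG (array : List Int) (i j : Nat) : Int :=
  if j < i then 0
  else if _h : i < j then
    max (pvA array i + (pvS array (i+1) j - pvG array (i+1) j))
        (pvA array j + (pvS array i (j-1) - pvG array i (j-1)))
  else pvA array i
  termination_by (j + 1 - i)
  decreasing_by all_goals omega

theorem pvF_diag (array : List Int) (i : Nat) : pvF array i i = pvA array i := by
  rw [pvF]; simp

theorem pvG_diag (array : List Int) (i : Nat) : pvG array i i = pvA array i := by
  rw [pvG]; simp

theorem pvS_diag (array : List Int) (i : Nat) (h : i < array.length) :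
    pvS array i i = pvA array i := by
  unfold pvS pvA
  rw [List.sum_take_succ _ _ h, List.getD_eq_getElem _ _ h]
  ring

theorem pvS_left (array : List Int) (i j : Nat) (h1 : i ≤ j) (h2 : j < array.length) :
    pvS array i j = pvA array i + pvS array (i+1) j := by
  unfold pvS pvA
  rw [List.sum_take_succ _ i (by omega), List.getD_eq_getElem _ _ (by omega)]
  ring

theorem pvS_right (array : List Int) (i j : Nat) (h1 : i < j) (h2 : j < array.length) :
    pvS array i j = pvA array j + pvS array i (j-1) := by
  unfold pvS pvA
  have hj : j - 1 + 1 = j := by omega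
  rw [hj, List.sum_take_succ _ j h2, List.getD_eq_getElem _ _ h2]
  ring

-- the central equivalence of the two recurrences, with the "second player" invariant
theorem pvFG (array : List Int) :
    ∀ g i j, i ≤ j → j < array.length → j - i = g →
      pvF array i j = pvG array i j ∧
      pvS array i j - pvF array i j =
        (if i < j then min (pvF array (i+1) j) (pvF array i (j-1)) else 0) := by
  intro g
  induction g using Nat.strong_induction_on with
  | _ g IH =>
    intro i j hij hjn hg
    by_cases h0 : j = i
    · subst h0
      rw [pvF_diag, pvG_diag, pvS_diag _ _ hjn]
      simp
    · have hlt : i < j := by omega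
      by_cases h1 : j = i + 1
      · -- gap 1
        have hFij : pvF array i j = max (pvA array i) (pvA array j) := by
          rw [pvF]
          have : ¬ (i + 2 ≤ j) := by omega
          simp [this, if_neg (by omega : ¬ j < i)]
        have hGij : pvG array i j = max (pvA array i) (pvA array j) := by
          rw [pvG]
          rw [if_neg (by omega : ¬ j < i), dif_pos hlt]
          have e1 : pvG array (i+1) j = pvA array j := by
            rw [h1, pvG_diag]
          have e2 : pvG array i (j-1) = pvA array i := by
            have : j - 1 = i := by omega
            rw [this, pvG_diag]
          have e3 : pvS array (i+1) j = pvA array j := by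
            rw [h1, pvS_diag _ _ (by omega)]
          have e4 : pvS array i (j-1) = pvA array i := by
            have : j - 1 = i := by omega
            rw [this, pvS_diag _ _ (by omega)]
          rw [e1, e2, e3, e4]; ring_nf
        constructor
        · rw [hFij, hGij]
        · rw [if_pos hlt, hFij]
          have e1 : pvF array (i+1) j = pvA array j := by rw [h1, pvF_diag]
          have e2 : pvF array i (j-1) = pvA array i := by
            have : j - 1 = i := by omega
            rw [this, pvF_diag]
          have e3 : pvS array i j = pvA array i + pvA array j := by
            rw [pvS_left _ _ _ hij hjn, h1, pvS_diag _ _ (by omega)]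
          rw [e1, e2, e3]
          omega
      · -- gap ≥ 2
        have h2 : i + 2 ≤ j := by omega
        have hFij : pvF array i j =
            max (pvA array i + min (pvF array (i+2) j) (pvF array (i+1) (j-1)))
                (pvA array j + min (pvF array (i+1) (j-1)) (pvF array i (j-2))) := by
          rw [pvF]
          simp [h2, if_neg (by omega : ¬ j < i)]
        have IH1 := IH (g-1) (by omega) (i+1) j (by omega) hjn (by omega)
        have IH2 := IH (g-1) (by omega) i (j-1) (by omega) (by omega) (by omega)
        have hC1 : pvS array (i+1) j - pvF array (i+1) j =
            min (pvF array (i+2) j) (pvF array (i+1) (j-1)) := by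
          have := IH1.2
          rwa [if_pos (by omega : i + 1 < j)] at this
        have hC2 : pvS array i (j-1) - pvF array i (j-1) =
            min (pvF array (i+1) (j-1)) (pvF array i (j-2)) := by
          have := IH2.2
          rw [if_pos (by omega : i < j - 1)] at this
          have e : j - 1 - 1 = j - 2 := by omega
          rwa [e] at this
        have hFstep : pvF array i j =
            max (pvA array i + (pvS array (i+1) j - pvF array (i+1) j))
                (pvA array j + (pvS array i (j-1) - pvF array i (j-1))) := by
          rw [hFij, hC1, hC2]
        constructor
        · rw [hFstep, IH1.1, IH2.1]
          conv_rhs => rw [pvG]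
          rw [if_neg (by omega : ¬ j < i), dif_pos hlt]
        · rw [if_pos hlt, hFstep]
          have hL := pvS_left array i j hij hjn
          have hR := pvS_right array i j hlt hjn
          omega

-- ---------- table helpers ----------

def pvShape (n : Nat) (dp : List (List Int)) : Prop :=
  dp.length = n ∧ ∀ i, i < n → (dp.getD i []).length = n

def pvInit (n : Nat) : List (List Int) := (List.range n).map (fun _ => List.replicate n 0)

theorem pvShape_init (n : Nat) : pvShape n (pvInit n) := by
  refine ⟨by simp [pvInit], ?_⟩
  intro i hi
  simp [pvInit, List.getD_eq_getElem?_getD, hi]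

theorem pvGet_init (n i j : Nat) : pvGet (pvInit n) i j = 0 := by
  unfold pvGet pvInit
  by_cases hi : i < n
  · by_cases hj : j < n
    · simp [List.getD_eq_getElem?_getD, hi, hj]
    · simp [List.getD_eq_getElem?_getD, hi, hj]
  · simp [List.getD_eq_getElem?_getD, hi]

theorem pvShape_set (n : Nat) (dp : List (List Int)) (i j : Nat) (v : Int)
    (hs : pvShape n dp) : pvShape n (pvSet dp i j v) := by
  obtain ⟨h1, h2⟩ := hs
  refine ⟨by simp [pvSet, h1], ?_⟩
  intro k hk
  unfold pvSet
  by_cases hk' : k = i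
  · subst hk'
    by_cases hlt : k < dp.length
    · rw [List.getD_eq_getElem?_getD, List.getElem?_set_self hlt]
      simpa using h2 k hk
    · exact absurd hk (by omega)
  · rw [List.getD_eq_getElem?_getD, List.getElem?_set_ne (by omega), ← List.getD_eq_getElem?_getD]
    exact h2 k hk

theorem pvGet_set (n : Nat) (dp : List (List Int)) (i j : Nat) (v : Int)
    (hs : pvShape n dp) (hi : i < n) (hj : j < n) (i' j' : Nat) :
    pvGet (pvSet dp i j v) i' j' = if i' = i ∧ j' = j then v else pvGet dp i' j' := by
  obtain ⟨h1, h2⟩ := hs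
  unfold pvGet pvSet
  by_cases hii : i' = i
  · subst hii
    have hrow : (dp.set i' ((dp.getD i' []).set j v)).getD i' [] = (dp.getD i' []).set j v := by
      rw [List.getD_eq_getElem?_getD, List.getElem?_set_self (by omega)]
      rfl
    rw [hrow]
    by_cases hjj : j' = j
    · subst hjj
      rw [List.getD_eq_getElem?_getD,
        List.getElem?_set_self (by rw [h2 i' hi]; omega), if_pos ⟨rfl, rfl⟩]
      rfl
    · rw [List.getD_eq_getElem?_getD, List.getElem?_set_ne (by omega),
        ← List.getD_eq_getElem?_getD, if_neg (by simp [hjj])]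
  · have hrow : (dp.set i ((dp.getD i []).set j v)).getD i' [] = dp.getD i' [] := by
      rw [List.getD_eq_getElem?_getD, List.getElem?_set_ne (by omega),
        ← List.getD_eq_getElem?_getD]
    rw [hrow, if_neg (by simp [hii])]

-- ---------- A's loops compute pvF ----------

def pvInvA (array : List Int) (gap m : Nat) (dp : List (List Int)) : Prop :=
  pvShape array.length dp ∧
  ∀ i j, pvGet dp i j = if i ≤ j ∧ j < array.length ∧ (j - i < gap ∨ (j - i = gap ∧ j < m))
                        then pvF array i j else 0

theorem pvStepA_inv (array : List Int) (gap j0 : Nat) (dp : List (List Int))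
    (hg : gap ≤ j0) (hj : j0 < array.length) (h : pvInvA array gap j0 dp) :
    pvInvA array gap (j0+1) (pvStepA array gap dp j0) := by
  obtain ⟨hs, h⟩ := h
  have hset := pvGet_set array.length dp (j0 - gap) j0
      (max (array.getD (j0 - gap) 0 +
          min (if j0 - gap + 2 ≤ j0 then pvGet dp (j0 - gap + 2) j0 else 0)
              (if j0 - gap + 2 ≤ j0 then pvGet dp (j0 - gap + 1) (j0 - 1) else 0))
        (array.getD j0 0 +
          min (if j0 - gap + 2 ≤ j0 then pvGet dp (j0 - gap + 1) (j0 - 1) else 0)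
              (if j0 - gap + 2 ≤ j0 then pvGet dp (j0 - gap) (j0 - 2) else 0)))
      hs (by omega) hj
  have hv : (max (array.getD (j0 - gap) 0 +
          min (if j0 - gap + 2 ≤ j0 then pvGet dp (j0 - gap + 2) j0 else 0)
              (if j0 - gap + 2 ≤ j0 then pvGet dp (j0 - gap + 1) (j0 - 1) else 0))
        (array.getD j0 0 +
          min (if j0 - gap + 2 ≤ j0 then pvGet dp (j0 - gap + 1) (j0 - 1) else 0)
              (if j0 - gap + 2 ≤ j0 then pvGet dp (j0 - gap) (j0 - 2) else 0)))
      = pvF array (j0 - gap) j0 := by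
    rw [pvF]
    rw [if_neg (by omega : ¬ j0 < j0 - gap)]
    simp only [pvA]
    by_cases h2 : j0 - gap + 2 ≤ j0
    · have e1 : pvGet dp (j0 - gap + 2) j0 = pvF array (j0 - gap + 2) j0 := by
        rw [h (j0 - gap + 2) j0, if_pos ⟨by omega, hj, by omega⟩]
      have e2 : pvGet dp (j0 - gap + 1) (j0 - 1) = pvF array (j0 - gap + 1) (j0 - 1) := by
        rw [h (j0 - gap + 1) (j0 - 1), if_pos ⟨by omega, by omega, by omega⟩]
      have e3 : pvGet dp (j0 - gap) (j0 - 2) = pvF array (j0 - gap) (j0 - 2) := by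
        rw [h (j0 - gap) (j0 - 2), if_pos ⟨by omega, by omega, by omega⟩]
      simp only [if_pos h2, dif_pos h2, e1, e2, e3]
    · simp only [if_neg h2, dif_neg h2]
  constructor
  · exact pvShape_set _ _ _ _ _ ⟨hs.1, hs.2⟩
  intro i j
  show pvGet (pvSet dp (j0 - gap) j0 _) i j = _
  rw [hset i j]
  by_cases hc : i = j0 - gap ∧ j = j0
  · obtain ⟨hc1, hc2⟩ := hc
    subst hc1; subst hc2
    rw [if_pos ⟨rfl, rfl⟩, hv, if_pos ⟨by omega, hj, Or.inr ⟨by omega, by omega⟩⟩]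
  · rw [if_neg hc, h i j]
    refine if_congr ?_ rfl rfl
    constructor
    · rintro ⟨ha, hb, hc'⟩; exact ⟨ha, hb, by omega⟩
    · rintro ⟨ha, hb, hc'⟩
      refine ⟨ha, hb, ?_⟩
      rcases hc' with hlt | ⟨he, hm⟩
      · exact Or.inl hlt
      · by_cases hj0 : j = j0
        · exfalso; exact hc ⟨by omega, hj0⟩
        · exact Or.inr ⟨he, by omega⟩

theorem pvInnerA_inv (array : List Int) (gap : Nat) :
    ∀ cnt j0 dp, gap ≤ j0 → j0 + cnt ≤ array.length → pvInvA array gap j0 dp →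
      pvInvA array gap (j0 + cnt)
        ((List.range' j0 cnt).foldl (pvStepA array gap) dp) := by
  intro cnt
  induction cnt with
  | zero => intro j0 dp _ _ h; simpa using h
  | succ c ih =>
    intro j0 dp h1 h2 h
    rw [List.range'_succ, List.foldl_cons]
    have := ih (j0+1) (pvStepA array gap dp j0) (by omega) (by omega)
      (pvStepA_inv array gap j0 dp h1 (by omega) h)
    have e : j0 + 1 + c = j0 + (c + 1) := by omega
    rwa [e] at this

theorem pvOuterA_inv (array : List Int) :
    ∀ g, g ≤ array.length →
      pvInvA array g g
        ((List.range g).foldl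
          (fun dp gap => (List.range' gap (array.length - gap)).foldl (pvStepA array gap) dp)
          (pvInit array.length)) := by
  intro g
  induction g with
  | zero =>
    intro _
    refine ⟨pvShape_init _, ?_⟩
    intro i j
    simp only [List.range_zero, List.foldl_nil]
    rw [pvGet_init, if_neg (by omega)]
  | succ g ih =>
    intro hg
    rw [List.range_succ, List.foldl_append, List.foldl_cons, List.foldl_nil]
    have hstart := ih (by omega)
    have hres := pvInnerA_inv array g (array.length - g) g _ (le_refl g) (by omega) hstart
    have e : g + (array.length - g) = array.length := by omega
    rw [e] at hres
    refine ⟨hres.1, ?_⟩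
    intro i j
    rw [hres.2 i j]
    refine if_congr ?_ rfl rfl
    constructor
    · rintro ⟨ha, hb, hc⟩; exact ⟨ha, hb, by omega⟩
    · rintro ⟨ha, hb, hc⟩; exact ⟨ha, hb, by omega⟩

theorem pvA_eq_F (array : List Int) (h : array ≠ []) :
    predict_winner array = pvF array 0 (array.length - 1) := by
  have hn : 1 ≤ array.length := by
    cases array with
    | nil => exact absurd rfl h
    | cons a t => simp
  have := (pvOuterA_inv array array.length (le_refl _)).2 0 (array.length - 1)
  unfold predict_winner pvTblA
  rw [show ((List.range array.length).map (fun _ => List.replicate array.length (0:Int)))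
        = pvInit array.length from rfl]
  rw [this, if_pos ⟨by omega, by omega, by omega⟩]

-- ---------- prefix-sum list characterization ----------

def pvPsums (s : Int) : List Int → List Int
  | [] => []
  | v :: t => (s + v) :: pvPsums (s + v) t

theorem pvPreB_fold (l : List Int) :
    ∀ pre : List Int, pre ≠ [] →
      l.foldl (fun pre v => pre ++ [pre.getLastD 0 + v]) pre
        = pre ++ pvPsums (pre.getLastD 0) l := by
  induction l with
  | nil => intro pre _; simp [pvPsums]
  | cons v t ih =>
    intro pre hpre
    rw [List.foldl_cons]
    rw [ih (pre ++ [pre.getLastD 0 + v]) (by simp)]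
    have e : (pre ++ [pre.getLastD 0 + v]).getLastD 0 = pre.getLastD 0 + v := by
      simp
    rw [e, List.append_assoc]
    simp [pvPsums]

theorem pvPsums_getD (l : List Int) :
    ∀ s k, k < l.length → (pvPsums s l).getD k 0 = s + (l.take (k+1)).sum := by
  induction l with
  | nil => intro s k h; simp at h
  | cons v t ih =>
    intro s k h
    cases k with
    | zero => simp [pvPsums]
    | succ m =>
      simp only [pvPsums, List.getD_cons_succ, List.take_succ_cons, List.sum_cons]
      rw [ih (s + v) m (by simpa using h)]
      ring

theorem pvPreB_getD (array : List Int) (k : Nat) (h : k ≤ array.length) :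
    (pvPreB array).getD k 0 = (array.take k).sum := by
  unfold pvPreB
  rw [pvPreB_fold array [0] (by simp)]
  cases k with
  | zero => simp
  | succ m =>
    have e : ([0] ++ pvPsums (([0] : List Int).getLastD 0) array).getD (m+1) 0
        = (pvPsums 0 array).getD m 0 := by simp
    rw [e, pvPsums_getD array 0 m (by omega)]
    simp

-- ---------- B's loops compute pvG ----------

def pvInvB (array : List Int) (gap m : Nat) (dp : List (List Int)) : Prop :=
  pvShape array.length dp ∧
  ∀ i j, pvGet dp i j = if i ≤ j ∧ j < array.length ∧ (j - i < gap ∨ (j - i = gap ∧ i < m))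
                        then pvG array i j else 0

theorem pvStepB_inv (array : List Int) (gap i0 : Nat) (dp : List (List Int))
    (hg : 1 ≤ gap) (hi : i0 + gap < array.length) (h : pvInvB array gap i0 dp) :
    pvInvB array gap (i0+1) (pvStepB array (pvPreB array) gap dp i0) := by
  obtain ⟨hs, h⟩ := h
  have hset := pvGet_set array.length dp i0 (i0 + gap)
      (max (array.getD i0 0 +
          ((pvPreB array).getD (i0+gap+1) 0 - (pvPreB array).getD (i0+1) 0)
          - pvGet dp (i0+1) (i0+gap))
        (array.getD (i0+gap) 0 +
          ((pvPreB array).getD (i0+gap) 0 - (pvPreB array).getD i0 0)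
          - pvGet dp i0 (i0+gap-1)))
      hs (by omega) hi
  have hv : (max (array.getD i0 0 +
          ((pvPreB array).getD (i0+gap+1) 0 - (pvPreB array).getD (i0+1) 0)
          - pvGet dp (i0+1) (i0+gap))
        (array.getD (i0+gap) 0 +
          ((pvPreB array).getD (i0+gap) 0 - (pvPreB array).getD i0 0)
          - pvGet dp i0 (i0+gap-1)))
      = pvG array i0 (i0 + gap) := by
    have e1 : pvGet dp (i0+1) (i0+gap) = pvG array (i0+1) (i0+gap) := by
      rw [h (i0+1) (i0+gap), if_pos ⟨by omega, hi, by omega⟩]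
    have e2 : pvGet dp i0 (i0+gap-1) = pvG array i0 (i0+gap-1) := by
      rw [h i0 (i0+gap-1), if_pos ⟨by omega, by omega, by omega⟩]
    have p1 : (pvPreB array).getD (i0+gap+1) 0 = (array.take (i0+gap+1)).sum :=
      pvPreB_getD array _ (by omega)
    have p2 : (pvPreB array).getD (i0+1) 0 = (array.take (i0+1)).sum :=
      pvPreB_getD array _ (by omega)
    have p3 : (pvPreB array).getD (i0+gap) 0 = (array.take (i0+gap)).sum :=
      pvPreB_getD array _ (by omega)
    have p4 : (pvPreB array).getD i0 0 = (array.take i0).sum :=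
      pvPreB_getD array _ (by omega)
    rw [e1, e2, p1, p2, p3, p4]
    conv_rhs => rw [pvG]
    rw [if_neg (by omega : ¬ i0 + gap < i0), dif_pos (by omega : i0 < i0 + gap)]
    have e3 : i0 + gap - 1 + 1 = i0 + gap := by omega
    simp only [pvA, pvS, e3]
    ring_nf
  constructor
  · exact pvShape_set _ _ _ _ _ hs
  intro i j
  show pvGet (pvSet dp i0 (i0 + gap) _) i j = _
  rw [hset i j]
  by_cases hc : i = i0 ∧ j = i0 + gap
  · obtain ⟨hc1, hc2⟩ := hc
    subst hc1; subst hc2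
    rw [if_pos ⟨rfl, rfl⟩, hv, if_pos ⟨by omega, hi, Or.inr ⟨by omega, by omega⟩⟩]
  · rw [if_neg hc, h i j]
    refine if_congr ?_ rfl rfl
    constructor
    · rintro ⟨ha, hb, hc'⟩; exact ⟨ha, hb, by omega⟩
    · rintro ⟨ha, hb, hc'⟩
      refine ⟨ha, hb, ?_⟩
      rcases hc' with hlt | ⟨he, hm⟩
      · exact Or.inl hlt
      · by_cases hi0 : i = i0
        · exfalso; exact hc ⟨hi0, by omega⟩
        · exact Or.inr ⟨he, by omega⟩

theorem pvInnerB_inv (array : List Int) (gap : Nat) (hg : 1 ≤ gap) :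
    ∀ cnt dp, cnt + gap ≤ array.length → pvInvB array gap 0 dp →
      pvInvB array gap cnt
        ((List.range cnt).foldl (pvStepB array (pvPreB array) gap) dp) := by
  intro cnt
  induction cnt with
  | zero => intro dp _ h; simpa using h
  | succ c ih =>
    intro dp hcnt h
    rw [List.range_succ, List.foldl_append, List.foldl_cons, List.foldl_nil]
    exact pvStepB_inv array gap c _ hg (by omega) (ih dp (by omega) h)

theorem pvDiag_inv (array : List Int) :
    ∀ m, m ≤ array.length →
      pvShape array.length
        ((List.range m).foldl (fun dp i => pvSet dp i i (array.getD i 0))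
          (pvInit array.length)) ∧
      ∀ i j, pvGet ((List.range m).foldl (fun dp i => pvSet dp i i (array.getD i 0))
          (pvInit array.length)) i j
        = if i = j ∧ j < m then pvA array i else 0 := by
  intro m
  induction m with
  | zero =>
    intro _
    refine ⟨pvShape_init _, ?_⟩
    intro i j
    simp only [List.range_zero, List.foldl_nil]
    rw [pvGet_init, if_neg (by omega)]
  | succ g ih =>
    intro hm
    obtain ⟨ihs, ihv⟩ := ih (by omega)
    rw [List.range_succ, List.foldl_append, List.foldl_cons, List.foldl_nil]
    refine ⟨pvShape_set _ _ _ _ _ ihs, ?_⟩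
    intro i j
    rw [pvGet_set array.length _ g g (array.getD g 0) ihs (by omega) (by omega) i j]
    by_cases hc : i = g ∧ j = g
    · obtain ⟨h1, h2⟩ := hc
      subst h1; subst h2
      rw [if_pos ⟨rfl, rfl⟩, if_pos ⟨rfl, by omega⟩]
      rfl
    · rw [if_neg hc, ihv i j]
      refine if_congr ?_ rfl rfl
      constructor
      · rintro ⟨ha, hb⟩; exact ⟨ha, by omega⟩
      · rintro ⟨ha, hb⟩
        refine ⟨ha, ?_⟩
        by_cases hj : j = g
        · exfalso; exact hc ⟨by omega, hj⟩
        · omega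

theorem pvOuterB_inv (array : List Int) :
    ∀ cnt, 1 + cnt ≤ array.length →
      pvInvB array (1 + cnt) 0
        ((List.range' 1 cnt).foldl
          (fun dp gap => (List.range (array.length - gap)).foldl
              (pvStepB array (pvPreB array) gap) dp)
          ((List.range array.length).foldl
            (fun dp i => pvSet dp i i (array.getD i 0))
            (pvInit array.length))) := by
  intro cnt
  induction cnt with
  | zero =>
    intro h
    obtain ⟨hs, hv⟩ := pvDiag_inv array array.length (le_refl _)
    refine ⟨by simpa using hs, ?_⟩
    intro i j
    simp only [List.range'_zero, List.foldl_nil]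
    rw [hv i j]
    by_cases hc : i = j ∧ j < array.length
    · rw [if_pos hc, if_pos ⟨by omega, by omega, by omega⟩, hc.1, pvG_diag]
    · rw [if_neg hc, if_neg (by intro ⟨ha, hb, hd⟩; exact hc ⟨by omega, hb⟩)]
  | succ c ih =>
    intro h
    rw [List.range'_concat, List.foldl_append, List.foldl_cons, List.foldl_nil]
    simp only [Nat.one_mul]
    have hstart := ih (by omega)
    have hres := pvInnerB_inv array (1 + c) (by omega) (array.length - (1 + c)) _
        (by omega) hstart
    refine ⟨hres.1, ?_⟩
    intro i j
    rw [hres.2 i j]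
    refine if_congr ?_ rfl rfl
    constructor
    · rintro ⟨ha, hb, hc'⟩; exact ⟨ha, hb, by omega⟩
    · rintro ⟨ha, hb, hc'⟩; exact ⟨ha, hb, by omega⟩

theorem pvB_eq_G (array : List Int) (h : array ≠ []) :
    predict_winner_alt array = pvG array 0 (array.length - 1) := by
  have hn : 1 ≤ array.length := by
    cases array with
    | nil => exact absurd rfl h
    | cons a t => simp
  have := (pvOuterB_inv array (array.length - 1)
      (by omega)).2 0 (array.length - 1)
  unfold predict_winner_alt pvTblB
  rw [show ((List.range array.length).map (fun _ => List.replicate array.length (0:Int)))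
        = pvInit array.length from rfl]
  rw [this, if_pos ⟨by omega, by omega, by omega⟩]

-- ===== VERDICT (by name: the statement is the Claim_ definition above) =====
theorem predict_winner_spec : Claim_equal_predict_winner := by
  intro array _ hpre
  unfold Spec_predict_winner
  have hn : 1 ≤ array.length := by
    cases array with
    | nil => exact absurd rfl hpre
    | cons a t => simp
  rw [pvA_eq_F array hpre, pvB_eq_G array hpre]
  exact (pvFG array (array.length - 1 - 0) 0 (array.length - 1)
    (by omega) (by omega) rfl).1
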